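-- pv_equiv track=rewrite | github.com/konsilver/magent | src/backend/routing/message_parser.py | resolve_sources_conflict
-- ===== SOURCE A (Python) =====
-- from typing import Any, Dict, List, Tuple
--
-- def source_rank(source_type: str) -> int:
--     mapping = {
--         "database": 0,
--         "db": 0,
--         "dataset": 1,
--         "knowledge_base": 1,
--         "internet": 2,
--         "search": 2,
--     }
--     return mapping.get((source_type or "").strip().lower(), 99)
--
-- def _source_key(item: Dict[str, Any]) -> str:
--     name = str(item.get("name", "")).strip().lower()
--     url = str(item.get("url", "")).strip().lower()
--     detail = str(item.get("detail", "")).strip().lower()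
--     if name:
--         return f"name:{name}"
--     if url:
--         return f"url:{url}"
--     return f"detail:{detail}"
--
-- def normalize_source(item: Any) -> Dict[str, Any] | None:
--     if not isinstance(item, dict):
--         return None
--     source_type = str(item.get("source_type", item.get("type", ""))).strip().lower() or "unknown"
--     name = str(item.get("name", item.get("source", ""))).strip()
--     detail = str(item.get("detail", item.get("snippet", ""))).strip()
--     url = str(item.get("url", "")).strip()
--     if not name and not detail and not url:
--         return None
--     return {
--         "source_type": source_type,
--         "name": name or "unknown",
--         "detail": detail,
--         "url": url,
--     }
--
-- def resolve_sources_conflict(sources: List[Dict[str, Any]]) -> List[Dict[str, Any]]: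
--     """Resolve duplicate/conflicting sources by fixed priority.
--
--     Priority: Database > Dataset > Internet.
--     """
--     bucket: Dict[str, Dict[str, Any]] = {}
--     for raw in sources:
--         src = normalize_source(raw)
--         if src is None:
--             continue
--         key = _source_key(src)
--         old = bucket.get(key)
--         if old is None:
--             bucket[key] = src
--             continue
--         if source_rank(src["source_type"]) < source_rank(str(old.get("source_type", ""))):
--             bucket[key] = src
--     out = list(bucket.values())
--     out.sort(key=lambda x: (source_rank(str(x.get("source_type", ""))), str(x.get("name", ""))))
--     return out
-- ===== SOURCE B (Python) =====
-- from typing import Any, Dict, List, Optional, Tuple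
--
--
-- def _rank(source_type: str) -> int:
--     t = (source_type or "").strip().lower()
--     if t in ("database", "db"):
--         return 0
--     if t in ("dataset", "knowledge_base"):
--         return 1
--     if t in ("internet", "search"):
--         return 2
--     return 99
--
--
-- def _first(item: Dict[str, Any], keys: Tuple[str, ...]) -> Any:
--     for k in keys:
--         if k in item:
--             return item[k]
--     return ""
--
--
-- def _norm(item: Any) -> Optional[Tuple[str, str, str, str]]:
--     """Normalize to a (source_type, name, detail, url) tuple, or None to drop."""
--     if not isinstance(item, dict):
--         return None
--     st = str(_first(item, ("source_type", "type"))).strip().lower()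
--     name = str(_first(item, ("name", "source"))).strip()
--     detail = str(_first(item, ("detail", "snippet"))).strip()
--     url = str(item.get("url", "")).strip()
--     if not name and not detail and not url:
--         return None
--     return (st or "unknown", name or "unknown", detail, url)
--
--
-- def _winners(items: List[Tuple[str, str, str, str]]) -> List[Tuple[str, str, str, str]]:
--     """Partition-style dedup: peel off the first tuple's group (normalized
--     names always exist, so the group key is the lowercased name), keep its
--     best-ranked member (first on ties), recurse on the rest."""
--     out = []
--     while items:
--         head, tail = items[0], items[1:]
--         k = head[1].strip().lower()
--         best = head
--         for s in tail:
--             if s[1].strip().lower() == k and _rank(s[0]) < _rank(best[0]):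
--                 best = s
--         out.append(best)
--         items = [s for s in tail if s[1].strip().lower() != k]
--     return out
--
--
-- def resolve_sources_conflict(sources: List[Dict[str, Any]]) -> List[Dict[str, Any]]:
--     picked = _winners([t for t in map(_norm, sources) if t is not None])
--     out = [{"source_type": st, "name": name, "detail": detail, "url": url}
--            for (st, name, detail, url) in picked]
--     out.sort(key=lambda x: (_rank(str(x.get("source_type", ""))), str(x.get("name", ""))))
--     return out
-- ===== Notes on version B (the rewrite author's own statement) =====
-- stated objective: alternative
-- what changed: Replaces A's dict-keyed keep-the-best fold with a dict-free partition dedup: normalize to (source_type, name, detail, url) tuples, repeatedly peel off the first tuple's lowercased-name group keeping its best-ranked member (first on ties), then rebuild the dicts and sort.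
import Mathlib
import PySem

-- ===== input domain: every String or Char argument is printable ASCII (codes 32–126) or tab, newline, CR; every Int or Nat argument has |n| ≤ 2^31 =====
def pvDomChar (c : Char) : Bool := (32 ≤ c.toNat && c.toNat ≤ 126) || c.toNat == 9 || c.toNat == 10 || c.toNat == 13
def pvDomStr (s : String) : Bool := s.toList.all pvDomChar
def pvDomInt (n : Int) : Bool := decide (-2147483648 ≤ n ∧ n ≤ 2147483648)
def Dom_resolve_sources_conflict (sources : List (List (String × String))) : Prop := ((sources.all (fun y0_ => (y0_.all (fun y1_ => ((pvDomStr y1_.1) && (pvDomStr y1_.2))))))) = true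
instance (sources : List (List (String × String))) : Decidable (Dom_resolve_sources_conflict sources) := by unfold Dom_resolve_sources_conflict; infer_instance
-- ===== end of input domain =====

set_option maxRecDepth 4096
set_option maxHeartbeats 1000000


-- B replaces A's dict-keyed keep-the-best fold by a dict-free partition dedup: normalize to
-- (source_type, name, detail, url) tuples, repeatedly peel off the first tuple's name-key group
-- and keep its best-ranked member (first on ties), then rebuild the dicts and sort.
-- Objective: alternative decomposition, same observable result.

-- ===== PORT A =====
-- Python dict lookup on the input association list (first match): item.get(k)
def pyget (item : List (String × String)) (k : String) : Option String :=
  (item.find? (fun p => p.1 == k)).map (fun p => p.2)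

-- item.get(k, d)
def pygetD (item : List (String × String)) (k d : String) : String :=
  (pyget item k).getD d

def source_rank (source_type : String) : Int :=
  let mapping : PySem.Dict String Int := PySem.Dict.ofList
    [("database", 0), ("db", 0), ("dataset", 1), ("knowledge_base", 1), ("internet", 2), ("search", 2)]
  -- (source_type or ""): a string is falsy exactly when empty
  mapping.getD (PySem.Str.lower (PySem.Str.strip (if source_type == "" then "" else source_type))) 99

def source_key (item : List (String × String)) : String :=
  let name := PySem.Str.lower (PySem.Str.strip (pygetD item "name" ""))
  let url := PySem.Str.lower (PySem.Str.strip (pygetD item "url" ""))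
  let detail := PySem.Str.lower (PySem.Str.strip (pygetD item "detail" ""))
  if name ≠ "" then "name:" ++ name
  else if url ≠ "" then "url:" ++ url
  else "detail:" ++ detail

-- values are strings under the type convention, so every str(...) is the identity
def normalize_source (item : List (String × String)) : Option (List (String × String)) :=
  let st0 := PySem.Str.lower (PySem.Str.strip (match pyget item "source_type" with
    | some v => v
    | none => pygetD item "type" ""))
  let source_type := if st0 == "" then "unknown" else st0
  let name := PySem.Str.strip (match pyget item "name" with
    | some v => v
    | none => pygetD item "source" "")
  let detail := PySem.Str.strip (match pyget item "detail" with
    | some v => v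
    | none => pygetD item "snippet" "")
  let url := PySem.Str.strip (pygetD item "url" "")
  if name == "" && detail == "" && url == "" then none
  else some [("source_type", source_type), ("name", if name == "" then "unknown" else name),
             ("detail", detail), ("url", url)]

def resolve_sources_conflict (sources : List (List (String × String))) : List (List (String × String)) :=
  let bucket : PySem.Dict String (List (String × String)) :=
    sources.foldl (fun d raw =>
      match normalize_source raw with
      | none => d
      | some src =>
        let key := source_key src
        match d.get? key with
        | none => d.insert key src
        | some old =>
          -- src["source_type"] always exists in a normalized source, so the "" default is exact
          if source_rank (pygetD src "source_type" "") < source_rank (pygetD old "source_type" "")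
          then d.insert key src else d) PySem.Dict.empty
  PySem.List.sorted2 bucket.values
    (fun x => source_rank (pygetD x "source_type" ""))
    (fun x => pygetD x "name" "")

-- ===== PORT B =====
-- B-side dict lookup, written as direct recursion over the association list (k in item / item[k])
def bget? (item : List (String × String)) (k : String) : Option String :=
  match item with
  | [] => none
  | (k', v) :: t => if k' == k then some v else bget? t k

-- item.get(k, d)
def bgetD (item : List (String × String)) (k d : String) : String :=
  match bget? item k with
  | some v => v
  | none => d

def brank (source_type : String) : Int :=
  let t := PySem.Str.lower (PySem.Str.strip (if source_type == "" then "" else source_type))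
  if t == "database" || t == "db" then 0
  else if t == "dataset" || t == "knowledge_base" then 1
  else if t == "internet" || t == "search" then 2
  else 99

-- _first(item, keys): first present key's value, else ""
def bfirst (item : List (String × String)) : List String → String
  | [] => ""
  | k :: t =>
    match bget? item k with
    | some v => v
    | none => bfirst item t

-- _norm: normalize to a (source_type, name, detail, url) tuple, or none to drop
def bnorm (item : List (String × String)) : Option (String × String × String × String) :=
  let st := PySem.Str.lower (PySem.Str.strip (bfirst item ["source_type", "type"]))
  let name := PySem.Str.strip (bfirst item ["name", "source"])
  let detail := PySem.Str.strip (bfirst item ["detail", "snippet"])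
  let url := PySem.Str.strip (bgetD item "url" "")
  if name == "" && detail == "" && url == "" then none
  else some (if st == "" then "unknown" else st,
             if name == "" then "unknown" else name, detail, url)

-- the group key of a normalized tuple: s[1].strip().lower()
def bkey (t : String × String × String × String) : String :=
  PySem.Str.lower (PySem.Str.strip t.2.1)

-- _winners: peel off the first tuple's group, keep its best-ranked member (first on ties)
def bwinners : List (String × String × String × String) → List (String × String × String × String)
  | [] => []
  | head :: tail =>
    let k := bkey head
    let best := tail.foldl (fun b s => if bkey s == k && brank s.1 < brank b.1 then s else b) head
    best :: bwinners (tail.filter (fun s => bkey s != k))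
termination_by l => l.length
decreasing_by
  have h := List.length_filter_le (fun s => bkey s.1 != bkey head) tail.attach
  simp at h ⊢
  omega

-- rebuild the output dict from a tuple
def bdict (t : String × String × String × String) : List (String × String) :=
  [("source_type", t.1), ("name", t.2.1), ("detail", t.2.2.1), ("url", t.2.2.2)]

def resolve_sources_conflict_alt (sources : List (List (String × String))) : List (List (String × String)) :=
  let picked := bwinners (sources.filterMap bnorm)
  let out := picked.map bdict
  PySem.List.sorted2 out
    (fun x => brank (bgetD x "source_type" ""))
    (fun x => bgetD x "name" "")

-- ===== PRECONDITION & SPEC =====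
def Spec_resolve_sources_conflict (sources : List (List (String × String))) (out : List (List (String × String))) : Prop := out = resolve_sources_conflict_alt sources
instance (sources : List (List (String × String))) (out : List (List (String × String))) : Decidable (Spec_resolve_sources_conflict sources out) := by unfold Spec_resolve_sources_conflict; infer_instance

-- ===== CLAIM (what is proved, stated in full; the proofs are below) =====
def Claim_equal_resolve_sources_conflict : Prop := ∀ (sources : List (List (String × String))), Dom_resolve_sources_conflict sources → Spec_resolve_sources_conflict sources (resolve_sources_conflict sources)

-- ===== LEMMAS AND PROOFS =====

-- ---- bridge between the two lookup styles ----
lemma bget?_eq (item : List (String × String)) (k : String) : bget? item k = pyget item k := by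
  induction item with
  | nil => rfl
  | cons p t ih =>
    obtain ⟨k', v⟩ := p
    by_cases h : k' == k <;> simp [bget?, pyget, h] <;>
      simpa [pyget] using ih

lemma bgetD_eq (item : List (String × String)) (k d : String) : bgetD item k d = pygetD item k d := by
  rw [bgetD, bget?_eq, pygetD]
  cases pyget item k <;> rfl

lemma getD_mapping (t : String) :
    (PySem.Dict.ofList [("database", (0:Int)), ("db", 0), ("dataset", 1), ("knowledge_base", 1), ("internet", 2), ("search", 2)]).getD t 99
      = (if t == "database" || t == "db" then 0
         else if t == "dataset" || t == "knowledge_base" then 1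
         else if t == "internet" || t == "search" then 2
         else 99) := by
  have hof : PySem.Dict.ofList [("database", (0:Int)), ("db", 0), ("dataset", 1), ("knowledge_base", 1), ("internet", 2), ("search", 2)]
      = PySem.Dict.mk [("database", (0:Int)), ("db", 0), ("dataset", 1), ("knowledge_base", 1), ("internet", 2), ("search", 2)] := by decide
  rw [hof]
  by_cases h1 : t = "database"
  · subst h1; decide
  by_cases h2 : t = "db"
  · subst h2; decide
  by_cases h3 : t = "dataset"
  · subst h3; decide
  by_cases h4 : t = "knowledge_base"
  · subst h4; decide
  by_cases h5 : t = "internet"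
  · subst h5; decide
  by_cases h6 : t = "search"
  · subst h6; decide
  have g : ∀ (u : String), ¬ t = u → (u == t) = false ∧ (t == u) = false := by
    intro u hu
    constructor <;> simp <;> intro hc
    · exact hu hc.symm
    · exact hu hc
  simp [PySem.Dict.getD_eq_get?_getD,
    (g _ h1).1, (g _ h2).1, (g _ h3).1, (g _ h4).1, (g _ h5).1, (g _ h6).1,
    (g _ h1).2, (g _ h2).2, (g _ h3).2, (g _ h4).2, (g _ h5).2, (g _ h6).2, PySem.Dict.get?]

lemma brank_eq (s : String) : brank s = source_rank s := by
  rw [brank, source_rank]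
  exact (getD_mapping _).symm

lemma bfirst_two (item : List (String × String)) (k1 k2 : String) :
    bfirst item [k1, k2] = (match pyget item k1 with
      | some v => v
      | none => pygetD item k2 "") := by
  rw [bfirst, bget?_eq]
  cases pyget item k1 with
  | some v => rfl
  | none =>
    rw [bfirst, bget?_eq, pygetD]
    cases pyget item k2 <;> rfl

lemma norm_eq (item : List (String × String)) :
    normalize_source item = (bnorm item).map bdict := by
  rw [normalize_source, bnorm, ← bfirst_two item "source_type" "type",
      ← bfirst_two item "name" "source", ← bfirst_two item "detail" "snippet", ← bgetD_eq]
  by_cases h : (PySem.Str.strip (bfirst item ["name", "source"]) == "" &&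
      PySem.Str.strip (bfirst item ["detail", "snippet"]) == "" &&
      PySem.Str.strip (bgetD item "url" "") == "") = true <;>
    simp only [h, if_true, Bool.not_eq_true] at * <;> simp [bdict]

-- ---- nonemptiness of the group key of a normalized tuple ----
lemma strip_aux (u : List Char) (hu : List.dropWhile PySem.Chars.isspace u = u) :
    PySem.Chars.strip (PySem.Chars.rstrip u) = PySem.Chars.rstrip u := by
  have hpre : (List.dropWhile PySem.Chars.isspace u.reverse).reverse <+: u := by
    apply List.reverse_suffix.mp
    rw [List.reverse_reverse]
    exact List.dropWhile_suffix _
  have hl : List.dropWhile PySem.Chars.isspace (List.dropWhile PySem.Chars.isspace u.reverse).reverse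
      = (List.dropWhile PySem.Chars.isspace u.reverse).reverse := by
    cases hre : (List.dropWhile PySem.Chars.isspace u.reverse).reverse with
    | nil => simp
    | cons a l =>
      obtain ⟨sfx, hs⟩ := hpre
      rw [hre] at hs
      have ha : PySem.Chars.isspace a = false := by
        by_contra hcon
        have hc' : PySem.Chars.isspace a = true := by simpa using hcon
        have h2 := hu
        rw [← hs, List.cons_append, List.dropWhile_cons, hc'] at h2
        have hlen := congrArg List.length h2
        have hle := List.length_dropWhile_le (p := PySem.Chars.isspace) (l := l ++ sfx)
        simp [List.length_append] at hlen hle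
        omega
      rw [List.dropWhile_cons, ha]
      simp
  unfold PySem.Chars.strip PySem.Chars.rstrip PySem.Chars.lstrip
  rw [hl, List.reverse_reverse, List.dropWhile_idempotent]

lemma strip_idem_chars (cs : List Char) :
    PySem.Chars.strip (PySem.Chars.strip cs) = PySem.Chars.strip cs := by
  have : PySem.Chars.strip cs = PySem.Chars.rstrip (List.dropWhile PySem.Chars.isspace cs) := rfl
  rw [this, strip_aux _ (List.dropWhile_idempotent _ _)]

lemma strip_idem (s : String) : PySem.Str.strip (PySem.Str.strip s) = PySem.Str.strip s := by
  apply String.toList_inj.mp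
  rw [PySem.Str.toList_strip, PySem.Str.toList_strip, strip_idem_chars]

lemma lower_ne_empty (s : String) (h : s ≠ "") : PySem.Str.lower s ≠ "" := by
  intro hc
  apply h
  apply String.toList_eq_nil_iff.mp
  have := congrArg String.toList hc
  rw [PySem.Str.toList_lower] at this
  simpa [PySem.Chars.lower] using this

lemma bnorm_key (item : List (String × String)) (t : String × String × String × String)
    (h : bnorm item = some t) : bkey t ≠ "" := by
  rw [bnorm] at h
  split at h
  · simp at h
  · have ht : t.2.1 = (if PySem.Str.strip (bfirst item ["name", "source"]) == "" then "unknown"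
        else PySem.Str.strip (bfirst item ["name", "source"])) := by
      injection h with h'
      rw [← h']
    rw [bkey, ht]
    by_cases hne : (PySem.Str.strip (bfirst item ["name", "source"]) == "") = true
    · rw [if_pos hne]; decide
    · rw [if_neg hne, strip_idem]
      exact lower_ne_empty _ (by simpa using hne)

-- ---- A-side loop machinery ----
def rnk (x : List (String × String)) : Int := source_rank (pygetD x "source_type" "")

def stepA (d : PySem.Dict String (List (String × String))) (raw : List (String × String)) :
    PySem.Dict String (List (String × String)) :=
  match normalize_source raw with
  | none => d
  | some src =>
    let key := source_key src
    match d.get? key with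
    | none => d.insert key src
    | some old =>
      if source_rank (pygetD src "source_type" "") < source_rank (pygetD old "source_type" "")
      then d.insert key src else d

def stepA' (d : PySem.Dict String (List (String × String))) (src : List (String × String)) :
    PySem.Dict String (List (String × String)) :=
  let key := source_key src
  match d.get? key with
  | none => d.insert key src
  | some old => if rnk src < rnk old then d.insert key src else d

def bestOf (b : List (String × String)) (l : List (List (String × String))) : List (String × String) :=
  l.foldl (fun b x => if rnk x < rnk b then x else b) b

lemma bestOf_cons (b x : List (String × String)) (l : List (List (String × String))) :
    bestOf b (x :: l) = bestOf (if rnk x < rnk b then x else b) l := by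
  rw [bestOf, bestOf, List.foldl_cons]

def WA : List (List (String × String)) → List (String × List (String × String))
  | [] => []
  | s :: t =>
    (source_key s, bestOf s (t.filter (fun x => source_key x == source_key s)))
      :: WA (t.filter (fun x => source_key x != source_key s))
termination_by l => l.length
decreasing_by
  have h := List.length_filter_le (fun x => source_key x != source_key s) t
  simp at h ⊢
  omega

lemma foldA_filterMap (l : List (List (String × String))) :
    ∀ d, l.foldl stepA d = (l.filterMap normalize_source).foldl stepA' d := by
  induction l with
  | nil => intro d; rfl
  | cons x t ih =>
    intro d
    rw [List.foldl_cons, List.filterMap_cons]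
    cases h : normalize_source x with
    | none => rw [ih]; simp [stepA, h]
    | some src =>
      rw [List.foldl_cons, ih]
      have hstep : stepA d x = stepA' d src := by
        simp only [stepA, stepA', h, rnk]
        rfl
      rw [hstep]

lemma foldA_items (ns : List (List (String × String))) :
    ∀ d : PySem.Dict String (List (String × String)), d.keys.Nodup →
    (ns.foldl stepA' d).items
      = d.items.map (fun p => (p.1, bestOf p.2 (ns.filter (fun s => source_key s == p.1))))
        ++ WA (ns.filter (fun s => !(d.contains (source_key s)))) := by
  induction ns with
  | nil =>
    intro d _
    simp [WA, bestOf]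
  | cons s t ih =>
    intro d hnd
    rw [List.foldl_cons]
    cases hv : d.get? (source_key s) with
    | none =>
      have hstep : stepA' d s = d.insert (source_key s) s := by
        simp only [stepA', hv]
      have hc : d.contains (source_key s) = false := by
        rw [PySem.Dict.contains_eq_isSome_get?, hv]; rfl
      have hnd' : (d.insert (source_key s) s).keys.Nodup := PySem.Dict.nodup_keys_insert d _ _ hnd
      rw [hstep, ih _ hnd', PySem.Dict.items_insert_of_not_contains d s hc, List.map_append]
      -- new-key filter rewrites
      have hfilter1 : (s :: t).filter (fun x => !(d.contains (source_key x)))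
          = s :: t.filter (fun x => !(d.contains (source_key x))) := by
        simp [hc]
      have hWA : WA ((s :: t).filter (fun x => !(d.contains (source_key x))))
          = (source_key s, bestOf s ((t.filter (fun x => !(d.contains (source_key x)))).filter
              (fun x => source_key x == source_key s)))
            :: WA ((t.filter (fun x => !(d.contains (source_key x)))).filter
              (fun x => source_key x != source_key s)) := by
        rw [hfilter1, WA]
      -- (i) inner group filter absorbs the freshness filter
      have habs : (t.filter (fun x => !(d.contains (source_key x)))).filter
            (fun x => source_key x == source_key s)
          = t.filter (fun x => source_key x == source_key s) := by
        rw [List.filter_filter]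
        apply List.filter_congr
        intro x _
        by_cases hx : source_key x = source_key s
        · simp [hx, hc]
        · simp [hx]
      -- (ii) remaining freshness filter = freshness w.r.t. the inserted dict
      have hrest : (t.filter (fun x => !(d.contains (source_key x)))).filter
            (fun x => source_key x != source_key s)
          = t.filter (fun x => !((d.insert (source_key s) s).contains (source_key x))) := by
        rw [List.filter_filter]
        apply List.filter_congr
        intro x _
        rw [PySem.Dict.contains_insert]
        by_cases hx : source_key x = source_key s
        · simp [hx]
        · simp [bne]
      -- (iii) existing entries: s never joins their group
      have hmap : d.items.map (fun p => (p.1, bestOf p.2 (t.filter (fun x => source_key x == p.1))))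
          = d.items.map (fun p => (p.1, bestOf p.2 ((s :: t).filter (fun x => source_key x == p.1)))) := by
        apply List.map_congr_left
        intro p hp
        have hpk : source_key s ≠ p.1 := by
          intro he
          have : d.contains p.1 = true := by
            rw [PySem.Dict.contains_iff_mem_keys]
            exact PySem.Dict.mem_keys_of_mem_items _ hp
          rw [← he] at this
          rw [this] at hc; exact Bool.noConfusion hc
        simp [hpk]
      rw [hWA, habs, hrest, ← hmap]
      simp only [List.map_cons, List.map_nil, List.append_assoc, List.singleton_append]
    | some old =>
      -- existing key: the entry's value becomes bestOf old [s]
      have hc : d.contains (source_key s) = true := by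
        rw [PySem.Dict.contains_eq_isSome_get?, hv]; rfl
      set w := if rnk s < rnk old then s else old with hw
      have hitems : (stepA' d s).items
          = d.items.map (fun p => if p.1 == source_key s then (source_key s, w) else p) := by
        simp only [stepA', hv]
        by_cases hlt : rnk s < rnk old
        · simp only [if_pos hlt]
          rw [PySem.Dict.items_insert_of_contains d s hc, hw, if_pos hlt]
        · simp only [if_neg hlt]
          rw [hw, if_neg hlt]
          conv_lhs => rw [← List.map_id d.items]
          apply List.map_congr_left (fun p hp => ?_)
          symm
          by_cases hpk : p.1 = source_key s
          · have hget : d.get? p.1 = some p.2 := PySem.Dict.get?_of_mem_items _ hp hnd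
            rw [hpk, hv] at hget
            have : p.2 = old := by injection hget.symm
            rw [show p = (p.1, p.2) from rfl, hpk, this]
            simp
          · simp [hpk]
      have hkeys : (stepA' d s).contains = d.contains := by
        funext k
        simp only [stepA', hv]
        by_cases hlt : rnk s < rnk old
        · rw [if_pos hlt, PySem.Dict.contains_insert]
          by_cases hk : k = source_key s
          · simp [hk, hc]
          · simp [hk]
        · rw [if_neg hlt]
      have hnd' : (stepA' d s).keys.Nodup := by
        simp only [stepA', hv]
        by_cases hlt : rnk s < rnk old
        · rw [if_pos hlt]; exact PySem.Dict.nodup_keys_insert d _ _ hnd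
        · rw [if_neg hlt]; exact hnd
      rw [ih _ hnd', hitems, List.map_map]
      have hWAside : t.filter (fun x => !((stepA' d s).contains (source_key x)))
          = (s :: t).filter (fun x => !(d.contains (source_key x))) := by
        rw [hkeys]
        simp [hc]
      rw [hWAside]
      refine congrArg₂ (· ++ ·) (List.map_congr_left ?_) rfl
      intro p hp
      obtain ⟨p1, p2⟩ := p
      by_cases hpk : p1 = source_key s
      · have hget : d.get? p1 = some p2 := PySem.Dict.get?_of_mem_items _ hp hnd
        rw [hpk, hv] at hget
        have hpold : p2 = old := by injection hget.symm
        have hps : ((p1, p2).1 == source_key s) = true := by simp [hpk]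
        have hfil2 : (s :: t).filter (fun x => source_key x == source_key s)
            = s :: t.filter (fun x => source_key x == source_key s) := by
          rw [List.filter_cons]
          have hq : (source_key s == source_key s) = true := by simp
          rw [hq, if_pos rfl]
        rw [Function.comp_apply]
        rw [if_pos hps]
        simp only [hpk, hpold, hfil2, bestOf_cons, ← hw]
      · have hps : ((p1, p2).1 == source_key s) = false := by
          simp only [beq_eq_false_iff_ne, ne_eq]
          exact hpk
        have hsp : (source_key s == (p1, p2).1) = false := by
          simp only [beq_eq_false_iff_ne, ne_eq]
          exact fun h => hpk h.symm
        have hfil : (s :: t).filter (fun x => source_key x == (p1, p2).1)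
            = t.filter (fun x => source_key x == (p1, p2).1) := by
          rw [List.filter_cons, hsp, if_neg Bool.false_ne_true]
        rw [Function.comp_apply]
        rw [hps, if_neg Bool.false_ne_true, hfil]

lemma valuesA (ns : List (List (String × String))) :
    ((ns.foldl stepA' PySem.Dict.empty)).values = (WA ns).map Prod.snd := by
  have h := foldA_items ns PySem.Dict.empty PySem.Dict.nodup_keys_empty
  have hfil : ns.filter (fun s => !((PySem.Dict.empty : PySem.Dict String (List (String × String))).contains (source_key s))) = ns := by
    apply List.filter_eq_self.mpr
    intro x _
    simp [PySem.Dict.contains_empty]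
  rw [hfil] at h
  have hempty : (PySem.Dict.empty : PySem.Dict String (List (String × String))).items = [] := rfl
  rw [hempty, List.map_nil, List.nil_append] at h
  rw [PySem.Dict.values, h]

-- ---- B-side correspondence ----
lemma rnk_bdict (x : String × String × String × String) : rnk (bdict x) = brank x.1 := by
  rw [rnk, brank_eq]; rfl

lemma name_bdict (x : String × String × String × String) : pygetD (bdict x) "name" "" = x.2.1 := rfl

lemma key_bdict (x : String × String × String × String) (h : bkey x ≠ "") :
    source_key (bdict x) = "name:" ++ bkey x := by
  simp only [source_key, name_bdict]
  rw [show PySem.Str.lower (PySem.Str.strip x.2.1) = bkey x from rfl, if_pos h]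

lemma key_bdict_eq_iff (x y : String × String × String × String)
    (hx : bkey x ≠ "") (hy : bkey y ≠ "") :
    (source_key (bdict x) == source_key (bdict y)) = (bkey x == bkey y) := by
  rw [key_bdict x hx, key_bdict y hy]
  by_cases h : bkey x = bkey y
  · simp [h]
  · simp [h]

lemma bestOf_map (l : List (String × String × String × String))
    (h : String × String × String × String) :
    bestOf (bdict h) (l.map bdict)
      = bdict (l.foldl (fun b x => if brank x.1 < brank b.1 then x else b) h) := by
  induction l generalizing h with
  | nil => rfl
  | cons a t ih =>
    rw [List.map_cons, bestOf, List.foldl_cons, List.foldl_cons]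
    rw [rnk_bdict, rnk_bdict]
    by_cases hlt : brank a.1 < brank h.1
    · rw [if_pos hlt, if_pos hlt, ← bestOf, ih]
    · rw [if_neg hlt, if_neg hlt, ← bestOf, ih]

lemma WA_map : ∀ (n : Nat) (l : List (String × String × String × String)), l.length ≤ n →
    (∀ t ∈ l, bkey t ≠ "") →
    (WA (l.map bdict)).map Prod.snd = (bwinners l).map bdict := by
  intro n
  induction n with
  | zero =>
    intro l hl _
    have hnil : l = [] := List.length_eq_zero_iff.mp (Nat.le_zero.mp hl)
    subst hnil
    simp [WA, bwinners]
  | succ n ih =>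
    intro l hl hP
    cases l with
    | nil => simp [WA, bwinners]
    | cons head tail =>
      have hPh : bkey head ≠ "" := hP head List.mem_cons_self
      rw [List.map_cons, WA]
      simp only [bwinners]
      -- group filter commutes with bdict
      have hfg : (tail.map bdict).filter (fun x => source_key x == source_key (bdict head))
          = (tail.filter (fun s => bkey s == bkey head)).map bdict := by
        rw [List.filter_map]
        refine congrArg (List.map bdict) (List.filter_congr ?_)
        intro x hx
        exact key_bdict_eq_iff x head (hP x (List.mem_cons_of_mem _ hx)) hPh
      have hfr : (tail.map bdict).filter (fun x => source_key x != source_key (bdict head))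
          = (tail.filter (fun s => bkey s != bkey head)).map bdict := by
        rw [List.filter_map]
        refine congrArg (List.map bdict) (List.filter_congr ?_)
        intro x hx
        simp only [Function.comp_apply, bne]
        rw [key_bdict_eq_iff x head (hP x (List.mem_cons_of_mem _ hx)) hPh]
      -- the guarded fold is the fold over the group
      have hbest : tail.foldl (fun b s => if bkey s == bkey head && brank s.1 < brank b.1 then s else b) head
          = (tail.filter (fun s => bkey s == bkey head)).foldl
              (fun b s => if brank s.1 < brank b.1 then s else b) head := by
        have hfun : (fun (b s : String × String × String × String) =>
              if bkey s == bkey head && brank s.1 < brank b.1 then s else b)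
            = (fun (b s : String × String × String × String) =>
              if (bkey s == bkey head) = true then (if brank s.1 < brank b.1 then s else b) else b) := by
          funext b s
          by_cases hk : (bkey s == bkey head) = true
          · simp [hk]
          · simp [hk]
        rw [hfun, ← List.foldl_filter]
      rw [List.map_cons, List.map_cons, hfg, hfr, bestOf_map, hbest]
      refine congrArg₂ _ rfl ?_
      exact ih _ (le_trans (List.length_filter_le _ _) (Nat.le_of_succ_le_succ hl))
        (fun x hx => hP x (List.mem_cons_of_mem _ (List.mem_of_mem_filter hx)))

-- ===== VERDICT (by name: the statement is the Claim_ definition above) =====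
theorem resolve_sources_conflict_spec : Claim_equal_resolve_sources_conflict := by
  intro sources _
  show resolve_sources_conflict sources = resolve_sources_conflict_alt sources
  show PySem.List.sorted2 ((sources.foldl stepA PySem.Dict.empty).values)
        (fun x => source_rank (pygetD x "source_type" ""))
        (fun x => pygetD x "name" "")
     = PySem.List.sorted2 ((bwinners (sources.filterMap bnorm)).map bdict)
        (fun x => brank (bgetD x "source_type" ""))
        (fun x => bgetD x "name" "")
  have hns : sources.filterMap normalize_source = (sources.filterMap bnorm).map bdict := by
    rw [List.map_filterMap]
    apply List.filterMap_congr
    intro x _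
    exact norm_eq x
  have hv : (sources.foldl stepA PySem.Dict.empty).values
      = (bwinners (sources.filterMap bnorm)).map bdict := by
    rw [foldA_filterMap, valuesA, hns]
    apply WA_map (sources.filterMap bnorm).length _ le_rfl
    intro t ht
    obtain ⟨item, _, hit⟩ := List.mem_filterMap.mp ht
    exact bnorm_key item t hit
  have hk1 : (fun x => brank (bgetD x "source_type" ""))
      = (fun x : List (String × String) => source_rank (pygetD x "source_type" "")) :=
    funext fun x => by rw [brank_eq, bgetD_eq]
  have hk2 : (fun x => bgetD x "name" "")
      = (fun x : List (String × String) => pygetD x "name" "") :=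
    funext fun x => bgetD_eq x "name" ""
  rw [hv, hk1, hk2]
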